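-- pv_equiv track=rewrite | github.com/alfogo/cortex-cloud-upgrade-helper-cleanup | CSPM Configurations/automation_rules_cleanup.py | _extract_cookie_value
-- ===== SOURCE A (Python) =====
-- from typing import Any, Dict, Iterable, List, Optional, Tuple
--
-- def _extract_cookie_value(cookie_header: str, names: Iterable[str]) -> Optional[str]:
--     cookies: Dict[str, str] = {}
--     for chunk in cookie_header.split(";"):
--         chunk = chunk.strip()
--         if not chunk or "=" not in chunk:
--             continue
--         k, v = chunk.split("=", 1)
--         cookies[k.strip()] = v.strip()
--
--     for name in names:
--         if name in cookies:
--             return cookies[name]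
--     return None
-- ===== SOURCE B (Python) =====
-- from typing import Iterable, Optional
--
-- def _extract_cookie_value(cookie_header: str, names: Iterable[str]) -> Optional[str]:
--     chunks = cookie_header.split(";")
--     for name in names:
--         hit = None  # (value,) when found, so empty values still count as hits
--         for chunk in chunks:
--             chunk = chunk.strip()
--             if not chunk or "=" not in chunk:
--                 continue
--             k, v = chunk.split("=", 1)
--             if k.strip() == name:
--                 hit = (v.strip(),)  # last occurrence wins
--         if hit is not None:
--             return hit[0]
--     return None
-- ===== Notes on version B (the rewrite author's own statement) =====
-- stated objective: alternative
-- what changed: B drops the up-front cookie dict entirely: it scans the ';'-split chunks once per requested name with a last-wins hit slot and returns on the first name that was seen, instead of A's dict-build-then-lookup.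
import Mathlib
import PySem

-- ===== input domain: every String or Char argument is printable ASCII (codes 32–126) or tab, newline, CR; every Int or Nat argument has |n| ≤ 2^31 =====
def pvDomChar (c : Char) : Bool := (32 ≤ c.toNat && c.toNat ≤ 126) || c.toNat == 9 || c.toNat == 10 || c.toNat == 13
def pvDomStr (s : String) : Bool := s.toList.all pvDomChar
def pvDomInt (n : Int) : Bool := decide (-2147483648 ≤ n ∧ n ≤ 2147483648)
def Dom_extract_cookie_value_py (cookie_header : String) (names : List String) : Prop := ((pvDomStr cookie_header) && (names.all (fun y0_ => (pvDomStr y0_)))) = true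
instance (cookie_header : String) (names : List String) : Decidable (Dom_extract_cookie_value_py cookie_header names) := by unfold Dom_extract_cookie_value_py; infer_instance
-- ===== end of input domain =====

-- B replaces A's build-the-whole-dict-then-look-up with a per-name last-wins scan of the split chunks (alternative decomposition, same results).

-- ===== PORT A =====
-- one loop iteration of A's dict-building loop
def pvAStep (d : PySem.Dict String String) (chunk : String) : PySem.Dict String String :=
  let c := PySem.Str.strip chunk
  if c = "" || !(PySem.Str.isIn "=" c) then d
  else
    match PySem.Str.splitMax? c "=" 1 with
    | some (k :: v :: _) => d.insert (PySem.Str.strip k) (PySem.Str.strip v)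
    | _ => d   -- unreachable: split on a present "=" yields ≥ 2 parts

-- A's second loop: first name present in the dict
def pvALookup (cookies : PySem.Dict String String) : List String → Option String
  | [] => none
  | n :: rest => if cookies.contains n then cookies.get? n else pvALookup cookies rest

def extract_cookie_value_py (cookie_header : String) (names : List String) : Option String :=
  let cookies := ((PySem.Str.split? cookie_header ";").getD []).foldl pvAStep PySem.Dict.empty
  pvALookup cookies names

-- ===== PORT B =====
-- B's inner loop: last-wins hit slot for one name over the chunks
def pvBScan (name : String) : List String → Option String → Option String
  | [], hit => hit
  | chunk :: rest, hit =>
    let c := PySem.Str.strip chunk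
    if c = "" || !(PySem.Str.isIn "=" c) then pvBScan name rest hit
    else
      match PySem.Str.splitMax? c "=" 1 with
      | some (k :: v :: _) =>
          if PySem.Str.strip k = name then pvBScan name rest (some (PySem.Str.strip v))
          else pvBScan name rest hit
      | _ => pvBScan name rest hit

-- B's outer loop over the names
def pvBLoop (chunks : List String) : List String → Option String
  | [] => none
  | name :: rest =>
    match pvBScan name chunks none with
    | some v => some v
    | none => pvBLoop chunks rest

def extract_cookie_value_py_alt (cookie_header : String) (names : List String) : Option String :=
  pvBLoop ((PySem.Str.split? cookie_header ";").getD []) names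

-- ===== PRECONDITION & SPEC =====
def Spec_extract_cookie_value_py (cookie_header : String) (names : List String) (out : Option String) : Prop := out = extract_cookie_value_py_alt cookie_header names
instance (cookie_header : String) (names : List String) (out : Option String) : Decidable (Spec_extract_cookie_value_py cookie_header names out) := by unfold Spec_extract_cookie_value_py; infer_instance

-- ===== CLAIM (what is proved, stated in full; the proofs are below) =====
def Claim_equal_extract_cookie_value_py : Prop := ∀ (cookie_header : String) (names : List String), Dom_extract_cookie_value_py cookie_header names → Spec_extract_cookie_value_py cookie_header names (extract_cookie_value_py cookie_header names)

-- ===== LEMMAS AND PROOFS =====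
-- B's scan starting from the current dict entry computes the dict entry after A's loop
lemma pvBScan_get? (name : String) (chunks : List String) (d : PySem.Dict String String) :
    pvBScan name chunks (d.get? name) = (chunks.foldl pvAStep d).get? name := by
  induction chunks generalizing d with
  | nil => rfl
  | cons chunk rest ih =>
    simp only [pvBScan, List.foldl, pvAStep]
    split
    · exact ih d
    · split
      · next k v _ _ =>
        by_cases hk : PySem.Str.strip k = name
        · rw [if_pos hk]
          have h := ih (d.insert (PySem.Str.strip k) (PySem.Str.strip v))
          rw [PySem.Dict.get?_insert, if_pos hk.symm] at h
          exact h
        · rw [if_neg hk]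
          have h := ih (d.insert (PySem.Str.strip k) (PySem.Str.strip v))
          rw [PySem.Dict.get?_insert, if_neg (fun e => hk e.symm)] at h
          exact h
      · exact ih d

lemma pvALookup_eq_pvBLoop (chunks : List String) (names : List String) :
    pvALookup (chunks.foldl pvAStep PySem.Dict.empty) names = pvBLoop chunks names := by
  induction names with
  | nil => rfl
  | cons n rest ih =>
    simp only [pvALookup, pvBLoop]
    have h : pvBScan n chunks none = (chunks.foldl pvAStep PySem.Dict.empty).get? n := by
      have := pvBScan_get? n chunks PySem.Dict.empty
      rwa [PySem.Dict.get?_empty] at this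
    rw [h, PySem.Dict.contains_eq_isSome_get?]
    cases hg : (chunks.foldl pvAStep PySem.Dict.empty).get? n with
    | none => simpa using ih
    | some v => simp

-- ===== VERDICT (by name: the statement is the Claim_ definition above) =====
theorem extract_cookie_value_py_spec : Claim_equal_extract_cookie_value_py := by
  intro cookie_header names _
  unfold Spec_extract_cookie_value_py extract_cookie_value_py extract_cookie_value_py_alt
  exact pvALookup_eq_pvBLoop _ _
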